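-- pv_equiv track=rewrite | github.com/zooo1/algorithm | programmers/weekly/4.py | solution
-- ===== SOURCE A (Python) =====
-- def solution(table, languages, preference):
--     score_info = {}
--     scores = {}
--     answers = []
--     for row in range(len(table)):
--         info = table[row].split(' ')
--         content = info[0]
--         langs = info[1:][::-1]
--         score_info[content] = {}
--         for idx in range(len(langs)):
--             lang = langs[idx]
--             if lang in languages:
--                 score_info[content][lang] = idx+1
--
--     for key in score_info.keys():
--         scores[key] = 0
--         for k, v in score_info[key].items():
--             idx = languages.index(k)
--             scores[key] += preference[idx] * v
--
--     max_value = max(list(scores.values()))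
--     for k, v in scores.items():
--         if v >= max_value:
--             max_value = v
--             answers.append(k)
--     answers.sort()
--     return answers[0]
-- ===== SOURCE B (Python) =====
-- def solution(table, languages, preference):
--     # preference lookup built once: first occurrence of a language wins (matches list.index)
--     pref = {}
--     for lang, p in zip(languages, preference):
--         if lang not in pref:
--             pref[lang] = p
--     # one pass over table: score each row directly with weight = len(langs) - position,
--     # counting only the first occurrence of each preferred language in the row
--     scores = {}
--     for row in table:
--         content, *langs = row.split(' ')
--         n = len(langs)
--         seen = set()
--         total = 0
--         for i, lang in enumerate(langs):
--             pv = pref.get(lang)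
--             if pv is not None and lang not in seen:
--                 seen.add(lang)
--                 total += pv * (n - i)
--         scores[content] = total
--     best = max(scores.values())
--     return min(k for k, v in scores.items() if v == best)
-- ===== Notes on version B (the rewrite author's own statement) =====
-- stated objective: simpler
-- what changed: Replaces A's two-phase nested dict (per-content language->reversed-index dict, then a second pass summing via list.index, then a running-max append loop plus sort) by a single pass that scores each row directly with weight len(langs)-position and a seen-set for duplicates, using one precomputed language->preference dict, then takes max/min over the scores dict.
import Mathlib
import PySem

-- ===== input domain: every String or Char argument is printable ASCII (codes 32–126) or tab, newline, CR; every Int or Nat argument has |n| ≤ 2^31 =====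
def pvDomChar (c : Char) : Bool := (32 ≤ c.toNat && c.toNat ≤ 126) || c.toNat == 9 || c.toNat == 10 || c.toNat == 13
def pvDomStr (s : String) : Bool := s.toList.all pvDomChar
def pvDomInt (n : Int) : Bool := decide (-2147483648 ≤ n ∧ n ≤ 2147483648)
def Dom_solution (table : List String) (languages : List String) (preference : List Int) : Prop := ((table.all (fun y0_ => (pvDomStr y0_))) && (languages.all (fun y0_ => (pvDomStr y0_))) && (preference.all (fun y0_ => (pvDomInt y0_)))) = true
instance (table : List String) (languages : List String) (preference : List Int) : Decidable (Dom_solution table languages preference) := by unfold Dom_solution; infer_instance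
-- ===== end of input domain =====

-- B builds each row's score in one pass (weight = remaining length, seen-set for duplicates)
-- instead of A's nested reversed-index dicts; equal return value on all of Pre_.

-- ===== PORT A =====
def solution (table : List String) (languages : List String) (preference : List Int) : String :=
  -- score_info: for each row, content ↦ {lang ↦ idx+1 over the reversed language list}
  let score_info : PySem.Dict String (PySem.Dict String Int) :=
    table.foldl (fun si rowS =>
      let info := (PySem.Str.split? rowS " ").getD []
      let content := PySem.List.pyGetD info 0 ""
      let langs := (info.drop 1).reverse
      -- score_info[content] = {}; then in-place assignments into that fresh dict
      let inner : PySem.Dict String Int :=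
        (PySem.List.enumerate langs 0).foldl (fun d p =>
          if p.2 ∈ languages then d.insert p.2 (p.1 + 1) else d) PySem.Dict.empty
      si.insert content inner) PySem.Dict.empty
  let scores : PySem.Dict String Int :=
    score_info.keys.foldl (fun sc key =>
      let sc1 := sc.insert key 0
      ((score_info.getD key PySem.Dict.empty).items).foldl (fun sc2 kv =>
        let idx : Int := ((PySem.List.index? languages kv.1).getD 0 : Nat)
        sc2.insert key (sc2.getD key 0 + PySem.List.pyGetD preference idx 0 * kv.2)) sc1)
      PySem.Dict.empty
  let max_value : Int := (PySem.List.max? scores.values (fun v => v)).getD 0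
  let res := scores.items.foldl (fun (st : Int × List String) kv =>
      if st.1 ≤ kv.2 then (kv.2, st.2 ++ [kv.1]) else st) (max_value, ([] : List String))
  let answers := PySem.List.sorted res.2 (fun x => x) false
  (PySem.List.pyGet? answers 0).getD ""

-- ===== PORT B =====
def buildPref (languages : List String) (preference : List Int) : PySem.Dict String Int :=
  (languages.zip preference).foldl (fun d p =>
    if d.contains p.1 then d else d.insert p.1 p.2) PySem.Dict.empty

def rowScore (pref : PySem.Dict String Int) (langs : List String) : Int :=
  ((PySem.List.enumerate langs 0).foldl
    (fun (st : PySem.Set String × Int) p =>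
      match pref.get? p.2 with
      | some pv =>
          if p.2 ∈ st.1 then st
          else (PySem.Set.add st.1 p.2, st.2 + pv * ((langs.length : Int) - p.1))
      | none => st)
    ((PySem.Set.empty : PySem.Set String), (0 : Int))).2

def solution_alt (table : List String) (languages : List String) (preference : List Int) : String :=
  let pref := buildPref languages preference
  let scores : PySem.Dict String Int :=
    table.foldl (fun sc rowS =>
      let info := (PySem.Str.split? rowS " ").getD []
      sc.insert (PySem.List.pyGetD info 0 "") (rowScore pref (info.drop 1))) PySem.Dict.empty
  let best := (PySem.List.max? scores.values (fun v => v)).getD 0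
  (PySem.List.min? (scores.items.filterMap (fun kv => if kv.2 = best then some kv.1 else none))
    (fun x => x)).getD ""

-- ===== PRECONDITION & SPEC =====
-- Pre_ excludes exactly the inputs where Python A raises: the empty table (max([]) is a
-- ValueError) and rows mentioning a language whose first index in `languages` is out of
-- range of `preference` (IndexError in preference[idx]).
def Pre_solution (table : List String) (languages : List String) (preference : List Int) : Prop :=
  table ≠ [] ∧
  ∀ rowS ∈ table, ∀ lang ∈ ((PySem.Str.split? rowS " ").getD []).drop 1,
    lang ∈ languages → (PySem.List.index? languages lang).getD 0 < preference.length
instance (table : List String) (languages : List String) (preference : List Int) : Decidable (Pre_solution table languages preference) := by unfold Pre_solution; infer_instance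
def pvWitness_solution : List String × List String × List Int :=
  (["c java python", "d python java java"], ["java", "python"], [5, 10])
def Spec_solution (table : List String) (languages : List String) (preference : List Int) (out : String) : Prop := out = solution_alt table languages preference
instance (table : List String) (languages : List String) (preference : List Int) (out : String) : Decidable (Spec_solution table languages preference out) := by unfold Spec_solution; infer_instance

-- ===== CLAIM (what is proved, stated in full; the proofs are below) =====
def Claim_equal_solution : Prop := ∀ (table : List String) (languages : List String) (preference : List Int), Dom_solution table languages preference → Pre_solution table languages preference → Spec_solution table languages preference (solution table languages preference)

-- ===== LEMMAS AND PROOFS =====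


-- ---- proof-side names for the intermediate values of the two ports (definitionally equal to the lets) ----

def contentOf (rowS : String) : String :=
  PySem.List.pyGetD ((PySem.Str.split? rowS " ").getD []) 0 ""

def langsOf (rowS : String) : List String :=
  ((PySem.Str.split? rowS " ").getD []).drop 1

-- the per-key value A's second pass multiplies with
def pvA (languages : List String) (preference : List Int) (k : String) : Int :=
  PySem.List.pyGetD preference (((PySem.List.index? languages k).getD 0 : Nat) : Int) 0

-- A's inner dict of a row, on the (already reversed) list
def innerD (languages : List String) (m : List String) : PySem.Dict String Int :=
  (PySem.List.enumerate m 0).foldl (fun d p =>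
    if p.2 ∈ languages then d.insert p.2 (p.1 + 1) else d) PySem.Dict.empty

def scoreInfoD (table : List String) (languages : List String) : PySem.Dict String (PySem.Dict String Int) :=
  table.foldl (fun si rowS =>
    si.insert (contentOf rowS) (innerD languages (langsOf rowS).reverse)) PySem.Dict.empty

def scoresA (table : List String) (languages : List String) (preference : List Int) : PySem.Dict String Int :=
  (scoreInfoD table languages).keys.foldl (fun sc key =>
    (((scoreInfoD table languages).getD key PySem.Dict.empty).items).foldl (fun sc2 kv =>
      sc2.insert key (sc2.getD key 0 + pvA languages preference kv.1 * kv.2))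
      (sc.insert key 0))
    PySem.Dict.empty

def scoresB (table : List String) (languages : List String) (preference : List Int) : PySem.Dict String Int :=
  table.foldl (fun sc rowS =>
    sc.insert (contentOf rowS) (rowScore (buildPref languages preference) (langsOf rowS)))
    PySem.Dict.empty

def selA (sc : PySem.Dict String Int) : String :=
  (PySem.List.pyGet? (PySem.List.sorted
    (sc.items.foldl (fun (st : Int × List String) kv =>
      if st.1 ≤ kv.2 then (kv.2, st.2 ++ [kv.1]) else st)
      ((PySem.List.max? sc.values (fun v => v)).getD 0, ([] : List String))).2
    (fun x => x) false) 0).getD ""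

def selB (sc : PySem.Dict String Int) : String :=
  (PySem.List.min? (sc.items.filterMap
      (fun kv => if kv.2 = (PySem.List.max? sc.values (fun v => v)).getD 0 then some kv.1 else none))
    (fun x => x)).getD ""

theorem solution_eq_selA (table languages : List String) (preference : List Int) :
    solution table languages preference = selA (scoresA table languages preference) := rfl

theorem solution_alt_eq_selB (table languages : List String) (preference : List Int) :
    solution_alt table languages preference = selB (scoresB table languages preference) := rfl

-- weighted sum over an association list, ignoring keys in S
def sx (pv : String → Int) (l : List (String × Int)) (S : List String) : Int :=
  (l.map (fun kv => if kv.1 ∈ S then 0 else pv kv.1 * kv.2)).sum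

theorem sx_congr (pv : String → Int) (l : List (String × Int)) (S S' : List String)
    (h : ∀ k, k ∈ S ↔ k ∈ S') : sx pv l S = sx pv l S' := by
  unfold sx
  congr 1
  refine List.map_congr_left (fun kv _ => ?_)
  by_cases hk : kv.1 ∈ S
  · simp [hk, (h kv.1).mp hk]
  · have hk' : kv.1 ∉ S' := fun hh => hk ((h kv.1).mpr hh)
    rw [if_neg hk, if_neg hk']

theorem sx_cons (pv : String → Int) (p : String × Int) (l : List (String × Int)) (S : List String) :
    sx pv (p :: l) S = (if p.1 ∈ S then 0 else pv p.1 * p.2) + sx pv l S := by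
  simp [sx]

theorem sx_append_singleton (pv : String → Int) (l : List (String × Int)) (e : String × Int)
    (S : List String) :
    sx pv (l ++ [e]) S = sx pv l S + (if e.1 ∈ S then 0 else pv e.1 * e.2) := by
  simp [sx]

theorem sx_no_key (pv : String → Int) (l : List (String × Int)) (x : String) (S : List String)
    (h : ∀ q ∈ l, q.1 ≠ x) : sx pv l (x :: S) = sx pv l S := by
  unfold sx
  congr 1
  refine List.map_congr_left (fun q hq => ?_)
  have : (q.1 ∈ x :: S) ↔ q.1 ∈ S := by simp [h q hq]
  by_cases hs : q.1 ∈ S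
  · rw [if_pos hs, if_pos (this.mpr hs)]
  · rw [if_neg hs, if_neg (fun hh => hs (this.mp hh))]

theorem sx_replace (pv : String → Int) (x : String) (v : Int) :
    ∀ (l : List (String × Int)) (S : List String), (l.map (·.1)).Nodup → x ∈ l.map (·.1) →
      sx pv (l.map (fun p => if p.1 == x then (x, v) else p)) S
        = (if x ∈ S then 0 else pv x * v) + sx pv l (x :: S) := by
  intro l
  induction l with
  | nil => simp
  | cons p t ih =>
      intro S hnd hmem
      simp only [List.map_cons] at hmem ⊢
      by_cases hx : p.1 = x
      · have hxt : x ∉ t.map (·.1) := by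
          rw [← hx]
          exact (List.nodup_cons.mp (by simpa using hnd)).1
        have ht : t.map (fun p => if p.1 == x then (x, v) else p) = t := by
          conv_rhs => rw [← List.map_id t]
          refine List.map_congr_left (fun q hq => ?_)
          have hq1 : q.1 ≠ x := fun h => hxt (h ▸ List.mem_map_of_mem hq)
          simp [hq1]
        rw [show (if (p.1 == x) = true then (x, v) else p) = (x, v) by simp [hx], ht,
          sx_cons, sx_cons]
        have h1 : p.1 ∈ x :: S := by simp [hx]
        rw [if_pos h1, sx_no_key pv t x S (fun q hq h => hxt (h ▸ List.mem_map_of_mem hq))]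
        ring
      · have hmem' : x ∈ t.map (·.1) := by
          rcases List.mem_cons.mp hmem with h | h
          · exact absurd h.symm hx
          · exact h
        have hnd' : (t.map (·.1)).Nodup := (List.nodup_cons.mp (by simpa using hnd)).2
        rw [show (if (p.1 == x) = true then (x, v) else p) = p by simp [hx],
          sx_cons, sx_cons, ih S hnd' hmem']
        have : (p.1 ∈ x :: S) ↔ p.1 ∈ S := by simp [hx]
        by_cases hs : p.1 ∈ S
        · rw [if_pos hs, if_pos (this.mpr hs)]
          ring
        · rw [if_neg hs, if_neg (fun hh => hs (this.mp hh))]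
          ring

theorem sx_insert (pv : String → Int) (d : PySem.Dict String Int) (hd : d.keys.Nodup)
    (x : String) (v : Int) (S : List String) :
    sx pv (d.insert x v).items S = (if x ∈ S then 0 else pv x * v) + sx pv d.items (x :: S) := by
  have hkeys : d.keys = d.items.map (·.1) := rfl
  cases hc : d.contains x with
  | false =>
      rw [PySem.Dict.items_insert_of_not_contains _ _ hc, sx_append_singleton]
      have hx : x ∉ d.items.map (·.1) := by
        have := PySem.Dict.contains_eq_decide_mem_keys d x
        rw [hc, hkeys] at this
        simpa using this.symm
      rw [sx_no_key pv d.items x S (fun q hq h => hx (h ▸ List.mem_map_of_mem hq))]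
      ring
  | true =>
      rw [PySem.Dict.items_insert_of_contains _ _ hc]
      refine sx_replace pv x v d.items S ?_ ?_
      · rw [← hkeys]; exact hd
      · have := PySem.Dict.contains_eq_decide_mem_keys d x
        rw [hc, hkeys] at this
        simpa using this.symm

-- A accumulates into one fixed key: the loop is "add up and insert once"
theorem foldA (l : List (String × Int)) (f : String × Int → Int) (sc : PySem.Dict String Int)
    (key : String) (v : Int) :
    l.foldl (fun sc2 kv => sc2.insert key (sc2.getD key 0 + f kv)) (sc.insert key v)
      = sc.insert key (v + (l.map f).sum) := by
  induction l generalizing v with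
  | nil => simp
  | cons x t ih =>
      simp only [List.foldl_cons, PySem.Dict.getD_insert_self, PySem.Dict.insert_insert_self,
        List.map_cons, List.sum_cons]
      rw [ih (v + f x), add_assoc]

-- first-occurrence-wins dict build = first match in the pair list
theorem fold_firstkeep (pairs : List (String × Int)) (d : PySem.Dict String Int) (x : String) :
    (pairs.foldl (fun d p => if d.contains p.1 then d else d.insert p.1 p.2) d).get? x
      = (d.get? x).or ((pairs.find? (fun p => p.1 == x)).map (·.2)) := by
  induction pairs generalizing d with
  | nil => simp
  | cons p t ih =>
      simp only [List.foldl_cons]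
      by_cases hc : d.contains p.1
      · simp only [hc, if_true]
        rw [ih]
        by_cases hx : p.1 = x
        · subst hx
          rw [PySem.Dict.contains_eq_isSome_get?] at hc
          obtain ⟨v, hv⟩ := Option.isSome_iff_exists.mp hc
          simp [hv]
        · simp [hx]
      · have hc' : d.contains p.1 = false := by simpa using hc
        simp only [hc', Bool.false_eq_true, if_false]
        rw [ih]
        by_cases hx : p.1 = x
        · subst hx
          have hn : d.get? p.1 = none := by
            rw [PySem.Dict.contains_eq_isSome_get?] at hc
            simpa using hc
          simp [PySem.Dict.get?_insert_self, hn]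
        · rw [PySem.Dict.get?_insert_of_ne _ _ (Ne.symm hx)]
          simp [hx]

theorem find_zip (L : List String) (P : List Int) (x : String) :
    ((L.zip P).find? (fun p => p.1 == x)).map (·.2)
      = (PySem.List.index? L x).bind (fun i => P[i]?) := by
  induction L generalizing P with
  | nil => simp [PySem.List.index?]
  | cons a L' ih =>
      cases P with
      | nil =>
          simp only [List.zip_nil_right, List.find?_nil, Option.map_none]
          cases h : PySem.List.index? (a :: L') x <;> simp
      | cons b P' =>
          by_cases hx : a = x
          · subst hx
            rw [PySem.List.index?_cons_self]
            simp
          · rw [PySem.List.index?_cons_of_ne _ hx]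
            simp only [List.zip_cons_cons, List.find?_cons]
            have hbe : (a == x) = false := by simp [hx]
            simp only [hbe]
            rw [ih]
            cases h : PySem.List.index? L' x <;> simp

theorem buildPref_get? (L : List String) (P : List Int) (x : String) :
    (buildPref L P).get? x = (PySem.List.index? L x).bind (fun i => P[i]?) := by
  unfold buildPref
  rw [fold_firstkeep, find_zip]
  simp

theorem innerD_nodup (languages m : List String) : (innerD languages m).keys.Nodup := by
  unfold innerD
  rw [PySem.List.foldl_ite_eq_foldl_filter (p := fun (p : Int × String) => p.2 ∈ languages)
    (f := fun (d : PySem.Dict String Int) (p : Int × String) => d.insert p.2 (p.1 + 1))]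
  exact PySem.Dict.nodup_keys_foldl_insert_key _ (fun (p : Int × String) => p.2)
    (fun (_ : PySem.Dict String Int) (p : Int × String) => p.1 + 1) _
    PySem.Dict.nodup_keys_empty

theorem innerD_rev_cons (languages : List String) (x : String) (rest : List String) :
    innerD languages ((x :: rest).reverse)
      = if x ∈ languages then (innerD languages rest.reverse).insert x ((rest.length : Int) + 1)
        else innerD languages rest.reverse := by
  unfold innerD
  rw [List.reverse_cons, PySem.List.enumerate_append, List.foldl_append]
  simp [PySem.List.enumerate_cons, PySem.List.enumerate_nil]

-- B's row loop with explicit weight base n and start index s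
def bloop (pref : PySem.Dict String Int) (n : Int) (ls : List String) (s : Int)
    (st : PySem.Set String × Int) : PySem.Set String × Int :=
  (PySem.List.enumerate ls s).foldl
    (fun st p =>
      match pref.get? p.2 with
      | some pv =>
          if p.2 ∈ st.1 then st
          else (PySem.Set.add st.1 p.2, st.2 + pv * (n - p.1))
      | none => st) st

theorem rowScore_eq_bloop (pref : PySem.Dict String Int) (ls : List String) :
    rowScore pref ls = (bloop pref (ls.length : Int) ls 0 (PySem.Set.empty, 0)).2 := rfl

theorem bloop_cons (pref : PySem.Dict String Int) (n : Int) (x : String) (rest : List String)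
    (s : Int) (st : PySem.Set String × Int) :
    bloop pref n (x :: rest) s st
      = bloop pref n rest (s + 1)
          (match pref.get? x with
           | some pv => if x ∈ st.1 then st else (PySem.Set.add st.1 x, st.2 + pv * (n - s))
           | none => st) := by
  unfold bloop
  rw [PySem.List.enumerate_cons, List.foldl_cons]

-- the heart: A's reversed-index dict summed = B's forward scan, given in-range preferences
theorem main_row (languages : List String) (preference : List Int) (n : Int) :
    ∀ (ls : List String) (s : Int) (S : PySem.Set String) (t : Int),
      n - s = (ls.length : Int) →
      (∀ lang ∈ ls, lang ∈ languages →
        (PySem.List.index? languages lang).getD 0 < preference.length) →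
      sx (pvA languages preference) (innerD languages ls.reverse).items S + t
        = (bloop (buildPref languages preference) n ls s (S, t)).2 := by
  intro ls
  induction ls with
  | nil =>
      intro s S t hns hpre
      simp [innerD, bloop, PySem.List.enumerate_nil, sx, PySem.Dict.empty]
  | cons x rest ih =>
      intro s S t hns hpre
      have hns' : n - (s + 1) = (rest.length : Int) := by
        simp only [List.length_cons] at hns; push_cast at hns; omega
      have hw : n - s = (rest.length : Int) + 1 := by
        simp only [List.length_cons] at hns; push_cast at hns; omega
      have hpre' := fun lang hm => hpre lang (List.mem_cons_of_mem _ hm)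
      rw [innerD_rev_cons, bloop_cons]
      by_cases hxl : x ∈ languages
      · obtain ⟨i, hi⟩ : ∃ i, PySem.List.index? languages x = some i :=
          Option.isSome_iff_exists.mp ((PySem.List.index?_isSome_iff languages x).mpr hxl)
        have hilen : i < preference.length := by
          have := hpre x List.mem_cons_self hxl
          rwa [hi, Option.getD_some] at this
        have hget : (buildPref languages preference).get? x = some preference[i] := by
          rw [buildPref_get?, hi]
          simp [List.getElem?_eq_getElem hilen]
        have hpva : pvA languages preference x = preference[i] := by
          unfold pvA
          rw [hi, Option.getD_some, PySem.List.pyGetD_natCast,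
            List.getD_eq_getElem?_getD, List.getElem?_eq_getElem hilen, Option.getD_some]
        rw [if_pos hxl, hget]
        by_cases hxs : x ∈ S
        · simp only [hxs, if_true]
          rw [sx_insert _ _ (innerD_nodup languages rest.reverse) x _ S, if_pos hxs,
            sx_congr _ _ (x :: S) S (fun k => by
              constructor
              · intro hk; rcases List.mem_cons.mp hk with h | h
                · exact h ▸ hxs
                · exact h
              · exact List.mem_cons_of_mem x), zero_add]
          exact ih (s + 1) S t hns' hpre'
        · simp only [hxs, if_false]
          rw [sx_insert _ _ (innerD_nodup languages rest.reverse) x _ S, if_neg hxs,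
            sx_congr _ _ (x :: S) (PySem.Set.add S x) (fun k => by
              rw [PySem.Set.mem_add, List.mem_cons]; tauto)]
          have hrec := ih (s + 1) (PySem.Set.add S x) (t + preference[i] * (n - s)) hns' hpre'
          rw [← hrec, hpva, hw]
          ring
      · rw [if_neg hxl]
        have hgetn : (buildPref languages preference).get? x = none := by
          rw [buildPref_get?, (PySem.List.index?_eq_none_iff _ _).mpr hxl]
          rfl
        rw [hgetn]
        exact ih (s + 1) S t hns' hpre'

-- per-row corollary in the exact shape the dict lemmas need
theorem row_value (languages : List String) (preference : List Int) (ls : List String)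
    (hpre : ∀ lang ∈ ls, lang ∈ languages →
      (PySem.List.index? languages lang).getD 0 < preference.length) :
    rowScore (buildPref languages preference) ls
      = 0 + (((innerD languages ls.reverse).items).map
          (fun kv => pvA languages preference kv.1 * kv.2)).sum := by
  rw [rowScore_eq_bloop]
  have hmain := main_row languages preference (ls.length : Int) ls 0 PySem.Set.empty 0
    (by simp) hpre
  rw [← hmain]
  have hsx : sx (pvA languages preference) (innerD languages ls.reverse).items PySem.Set.empty
      = (((innerD languages ls.reverse).items).map
          (fun kv => pvA languages preference kv.1 * kv.2)).sum := by
    simp [sx, PySem.Set.empty]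
  rw [hsx]
  ring

-- parallel insert folds with pointwise-related values have map-related items
theorem parallel_items {ν1 ν2 : Type} (l : List String) (k : String → String)
    (f : String → ν1) (g : String → ν2) (F : ν1 → ν2) (h : ∀ a ∈ l, g a = F (f a)) :
    ∀ (d1 : PySem.Dict String ν1) (d2 : PySem.Dict String ν2),
      d2.items = d1.items.map (fun p => (p.1, F p.2)) →
      (l.foldl (fun d a => d.insert (k a) (g a)) d2).items
        = (l.foldl (fun d a => d.insert (k a) (f a)) d1).items.map (fun p => (p.1, F p.2)) := by
  induction l with
  | nil =>
      intro d1 d2 hb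
      simpa using hb
  | cons a t ih =>
      intro d1 d2 hb
      simp only [List.foldl_cons]
      refine ih (fun b hbm => h b (List.mem_cons_of_mem _ hbm)) _ _ ?_
      have hga : g a = F (f a) := h a List.mem_cons_self
      have hkeys : d2.items.map (fun p => p.1) = d1.items.map (fun p => p.1) := by
        rw [hb, List.map_map]
        rfl
      have hcont : d2.contains (k a) = d1.contains (k a) := by
        rw [PySem.Dict.contains_eq_decide_mem_keys, PySem.Dict.contains_eq_decide_mem_keys]
        show decide (k a ∈ d2.items.map (fun p => p.1)) = decide (k a ∈ d1.items.map (fun p => p.1))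
        rw [hkeys]
      cases hc : d1.contains (k a) with
      | false =>
          rw [PySem.Dict.items_insert_of_not_contains _ _ (hcont.trans hc),
            PySem.Dict.items_insert_of_not_contains _ _ hc, hb, List.map_append, hga]
          rfl
      | true =>
          rw [PySem.Dict.items_insert_of_contains _ _ (hcont.trans hc),
            PySem.Dict.items_insert_of_contains _ _ hc, hb, List.map_map, List.map_map]
          refine List.map_congr_left (fun q _ => ?_)
          by_cases hq : q.1 = k a
          · simp [Function.comp, hq, hga]
          · simp [Function.comp, hq]

theorem scoreInfoD_nodup (table languages : List String) :
    (scoreInfoD table languages).keys.Nodup := by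
  exact PySem.Dict.nodup_keys_foldl_insert_key table contentOf
    (fun _ rowS => innerD languages (langsOf rowS).reverse)
    PySem.Dict.empty PySem.Dict.nodup_keys_empty

theorem scoresA_items (table languages : List String) (preference : List Int) :
    (scoresA table languages preference).items
      = (scoreInfoD table languages).keys.map (fun key =>
          (key, 0 + ((((scoreInfoD table languages).getD key PySem.Dict.empty).items).map
            (fun kv => pvA languages preference kv.1 * kv.2)).sum)) := by
  unfold scoresA
  rw [PySem.List.foldl_congr_mem (scoreInfoD table languages).keys _
    (fun sc key => sc.insert key
      (0 + ((((scoreInfoD table languages).getD key PySem.Dict.empty).items).map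
        (fun kv => pvA languages preference kv.1 * kv.2)).sum)) PySem.Dict.empty
    (fun sc key _ => foldA (((scoreInfoD table languages).getD key PySem.Dict.empty).items)
      (fun kv => pvA languages preference kv.1 * kv.2) sc key 0)]
  rw [PySem.Dict.items_foldl_insert_fresh (scoreInfoD table languages).keys (fun key => key)
    (fun key => 0 + ((((scoreInfoD table languages).getD key PySem.Dict.empty).items).map
      (fun kv => pvA languages preference kv.1 * kv.2)).sum) PySem.Dict.empty
    (fun a _ => PySem.Dict.contains_empty a)
    (by simpa using scoreInfoD_nodup table languages)]
  simp [PySem.Dict.empty]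

theorem scores_agree (table languages : List String) (preference : List Int)
    (hpre : ∀ rowS ∈ table, ∀ lang ∈ ((PySem.Str.split? rowS " ").getD []).drop 1,
      lang ∈ languages → (PySem.List.index? languages lang).getD 0 < preference.length) :
    scoresA table languages preference = scoresB table languages preference := by
  apply PySem.Dict.ext
  have hB : (scoresB table languages preference).items
      = (scoreInfoD table languages).items.map
          (fun p => (p.1, 0 + ((p.2.items).map
            (fun kv => pvA languages preference kv.1 * kv.2)).sum)) := by
    unfold scoresB scoreInfoD
    exact parallel_items table contentOf
      (fun rowS => innerD languages (langsOf rowS).reverse)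
      (fun rowS => rowScore (buildPref languages preference) (langsOf rowS))
      (fun d => 0 + ((d.items.map (fun kv => pvA languages preference kv.1 * kv.2)).sum))
      (fun rowS hmem => row_value languages preference _ (hpre rowS hmem))
      PySem.Dict.empty PySem.Dict.empty (by simp [PySem.Dict.empty])
  rw [scoresA_items, hB,
    PySem.Dict.items_eq_map_keys _ (scoreInfoD_nodup table languages) PySem.Dict.empty,
    List.map_map]
  rfl

theorem scoresB_ne_nil (table languages : List String) (preference : List Int)
    (hT : table ≠ []) : (scoresB table languages preference).items ≠ [] := by
  intro hnil
  have hkeys : (scoresB table languages preference).keys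
      = PySem.Set.update (PySem.Dict.empty : PySem.Dict String Int).keys
          (table.map contentOf) :=
    PySem.Dict.keys_foldl_insert_key table contentOf
      (fun _ rowS => rowScore (buildPref languages preference) (langsOf rowS))
      PySem.Dict.empty
  cases htab : table with
  | nil => exact hT htab
  | cons r rest =>
      have hmem : contentOf r ∈ (scoresB table languages preference).keys := by
        rw [hkeys, htab]
        exact (PySem.Set.mem_update _ _ _).mpr
          (Or.inr (List.mem_map_of_mem List.mem_cons_self))
      have hkn : (scoresB table languages preference).keys = [] := by
        show (scoresB table languages preference).items.map (fun p => p.1) = []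
        rw [hnil]
        rfl
      rw [hkn] at hmem
      exact List.not_mem_nil hmem

-- A's running-max-append loop starting AT the maximum collects the keys attaining it
theorem select_fold (l : List (String × Int)) (m : Int) (acc : List String)
    (h : ∀ kv ∈ l, kv.2 ≤ m) :
    l.foldl (fun (st : Int × List String) kv =>
        if st.1 ≤ kv.2 then (kv.2, st.2 ++ [kv.1]) else st) (m, acc)
      = (m, acc ++ (l.filter (fun kv => kv.2 = m)).map (·.1)) := by
  induction l generalizing acc with
  | nil => simp
  | cons kv t ih =>
      simp only [List.foldl_cons]
      by_cases hge : m ≤ kv.2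
      · have heq : kv.2 = m := le_antisymm (h kv List.mem_cons_self) hge
        rw [if_pos hge, heq, ih (acc ++ [kv.1]) (fun q hq => h q (List.mem_cons_of_mem _ hq))]
        simp [heq]
      · have hne2 : ¬ (kv.2 = m) := fun e => hge (le_of_eq e.symm)
        rw [if_neg hge, ih acc (fun q hq => h q (List.mem_cons_of_mem _ hq))]
        simp [hne2]

theorem filterMap_eq (l : List (String × Int)) (m : Int) :
    l.filterMap (fun kv => if kv.2 = m then some kv.1 else none)
      = (l.filter (fun kv => kv.2 = m)).map (·.1) := by
  induction l with
  | nil => rfl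
  | cons kv t ih =>
      by_cases hkv : kv.2 = m
      · simp [hkv, ih]
      · simp [hkv, ih]

theorem head_sorted_eq_min (ans : List String) (hne : ans ≠ []) :
    (PySem.List.pyGet? (PySem.List.sorted ans (fun x => x) false) 0).getD ""
      = (PySem.List.min? ans (fun x => x)).getD "" := by
  obtain ⟨h0, t, hs⟩ : ∃ h0 t, PySem.List.sorted ans (fun x => x) false = h0 :: t := by
    cases hsrt : PySem.List.sorted ans (fun x => x) false with
    | nil => exact absurd ((PySem.List.sorted_eq_nil_iff _ _ _).mp hsrt) hne
    | cons a b => exact ⟨a, b, rfl⟩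
  have hmemh : h0 ∈ ans := (PySem.List.mem_sorted _ _ _ _).mp (hs ▸ List.mem_cons_self)
  have hmin : ∀ y ∈ ans, h0 ≤ y := PySem.List.key_head_sorted_le _ _ hs
  obtain ⟨mn, hmn⟩ : ∃ mn, PySem.List.min? ans (fun x => x) = some mn := by
    cases hm : PySem.List.min? ans (fun x => x) with
    | none => exact absurd ((PySem.List.min?_eq_none_iff _ _).mp hm) hne
    | some mn => exact ⟨mn, rfl⟩
  rw [hs, hmn]
  have h1 : h0 ≤ mn := hmin mn (PySem.List.min?_mem hmn)
  have h2 : mn ≤ h0 := PySem.List.min?_isMin hmn h0 hmemh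
  have hg : PySem.List.pyGet? (h0 :: t) 0 = some h0 := by
    simp [PySem.List.pyGet?, PySem.List.pyIdx?]
  rw [hg]
  simp [le_antisymm h2 h1]

theorem sel_eq (sc : PySem.Dict String Int) (hne : sc.items ≠ []) : selA sc = selB sc := by
  have hvne : sc.values ≠ [] := by
    intro h
    exact hne (List.map_eq_nil_iff.mp h)
  obtain ⟨m, hm⟩ : ∃ m, PySem.List.max? sc.values (fun v => v) = some m := by
    cases h : PySem.List.max? sc.values (fun v => v) with
    | none => exact absurd ((PySem.List.max?_eq_none_iff _ _).mp h) hvne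
    | some m => exact ⟨m, rfl⟩
  have hub : ∀ kv ∈ sc.items, kv.2 ≤ m := by
    intro kv hkv
    exact PySem.List.max?_isMax hm kv.2 (List.mem_map_of_mem hkv)
  have hmmem : m ∈ sc.values := PySem.List.max?_mem hm
  obtain ⟨kv0, hkv0, hkv02⟩ := List.mem_map.mp hmmem
  unfold selA selB
  rw [hm, Option.getD_some, select_fold sc.items m [] hub, filterMap_eq]
  simp only [List.nil_append]
  refine head_sorted_eq_min _ ?_
  have hkv0f : kv0 ∈ sc.items.filter (fun kv => kv.2 = m) :=
    List.mem_filter.mpr ⟨hkv0, by simp [hkv02]⟩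
  exact List.ne_nil_of_mem (List.mem_map_of_mem hkv0f)

-- ===== VERDICT (by name: the statement is the Claim_ definition above) =====
theorem solution_spec : Claim_equal_solution := by
  intro table languages preference _hdom hpre
  obtain ⟨hT, hrows⟩ := hpre
  unfold Spec_solution
  rw [solution_eq_selA, solution_alt_eq_selB, scores_agree table languages preference hrows]
  exact sel_eq _ (scoresB_ne_nil table languages preference hT)
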